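-- pv_equiv track=rewrite | github.com/IHMAfrica/zm-scpro-pipeline | flink/job/utils/schema_utils.py | cohort_bucket
-- ===== SOURCE A (Python) =====
-- from typing import Any, Optional
--
-- def cohort_bucket(months_on_art: Optional[int]) -> Optional[str]:
--     if months_on_art is None:
--         return None
--     bounds = [3,6,12,24,36,48,60,72,84,96]
--     labels = ["0-3","4-6","7-12","13-24","25-36","37-48","49-60","61-72","73-84","85-96","97+"]
--     for i, b in enumerate(bounds):
--         if months_on_art <= b:
--             return labels[i]
--     return labels[-1]
-- ===== SOURCE B (Python) =====
-- from typing import Any, Optional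
--
-- def cohort_bucket(months_on_art: Optional[int]) -> Optional[str]:
--     if months_on_art is None:
--         return None
--     bounds = [3,6,12,24,36,48,60,72,84,96]
--     labels = ["0-3","4-6","7-12","13-24","25-36","37-48","49-60","61-72","73-84","85-96","97+"]
--     lo, hi = 0, len(bounds)
--     while lo < hi:
--         mid = (lo + hi) // 2
--         if bounds[mid] < months_on_art:
--             lo = mid + 1
--         else:
--             hi = mid
--     return labels[lo]
-- ===== Notes on version B (the rewrite author's own statement) =====
-- stated objective: alternative
-- what changed: Replaced the linear first-bound-satisfying scan with a hand-written binary search (bisect_left-style lo/hi loop) over the sorted bounds array, indexing the extended labels array directly.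
import Mathlib
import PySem

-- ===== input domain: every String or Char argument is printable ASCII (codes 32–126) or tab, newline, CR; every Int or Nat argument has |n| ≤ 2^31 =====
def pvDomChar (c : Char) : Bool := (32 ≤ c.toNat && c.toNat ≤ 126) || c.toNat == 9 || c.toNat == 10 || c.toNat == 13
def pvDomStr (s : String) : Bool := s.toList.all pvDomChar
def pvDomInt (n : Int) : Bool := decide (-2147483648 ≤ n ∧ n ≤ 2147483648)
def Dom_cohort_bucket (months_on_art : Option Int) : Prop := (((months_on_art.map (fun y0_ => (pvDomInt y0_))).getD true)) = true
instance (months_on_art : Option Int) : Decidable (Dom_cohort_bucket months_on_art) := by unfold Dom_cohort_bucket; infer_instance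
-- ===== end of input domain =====

-- B replaces A's linear scan over the bounds with a binary search (alternative algorithm, same result).


-- ===== PORT A =====
-- the 'for i, b in enumerate(bounds): if months_on_art <= b: return labels[i]' loop
def cohortLoop (pairs : List (Nat × Int)) (x : Int) (labels : List String) : Option String :=
  match pairs with
  | [] => PySem.List.pyGet? labels (-1)   -- fell through the loop: return labels[-1]
  | (i, b) :: rest => if x ≤ b then PySem.List.pyGet? labels (i : Int) else cohortLoop rest x labels

def cohort_bucket (months_on_art : Option Int) : Option String :=
  match months_on_art with
  | none => none
  | some x =>
    let bounds : List Int := [3,6,12,24,36,48,60,72,84,96]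
    let labels : List String := ["0-3","4-6","7-12","13-24","25-36","37-48","49-60","61-72","73-84","85-96","97+"]
    cohortLoop (List.zip (List.range bounds.length) bounds) x labels

-- ===== PORT B =====
-- the 'while lo < hi' binary-search loop of Source B; the fuel argument (bounds.length) only makes the
-- recursion structural: the loop runs at most hi - lo = bounds.length iterations, so it never runs out
def bsearchLo (bounds : List Int) (x : Int) : Nat → Nat → Nat → Nat
  | 0, lo, _ => lo
  | fuel + 1, lo, hi =>
    if lo < hi then
      let mid := (lo + hi) / 2
      if bounds.getD mid 0 < x then bsearchLo bounds x fuel (mid + 1) hi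
      else bsearchLo bounds x fuel lo mid
    else lo

def cohort_bucket_alt (months_on_art : Option Int) : Option String :=
  match months_on_art with
  | none => none
  | some x =>
    let bounds : List Int := [3,6,12,24,36,48,60,72,84,96]
    let labels : List String := ["0-3","4-6","7-12","13-24","25-36","37-48","49-60","61-72","73-84","85-96","97+"]
    PySem.List.pyGet? labels (bsearchLo bounds x bounds.length 0 bounds.length : Int)

-- ===== PRECONDITION & SPEC =====
def Spec_cohort_bucket (months_on_art : Option Int) (out : Option String) : Prop := out = cohort_bucket_alt months_on_art
instance (months_on_art : Option Int) (out : Option String) : Decidable (Spec_cohort_bucket months_on_art out) := by unfold Spec_cohort_bucket; infer_instance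

-- ===== CLAIM (what is proved, stated in full; the proofs are below) =====
def Claim_equal_cohort_bucket : Prop := ∀ (months_on_art : Option Int), Dom_cohort_bucket months_on_art → Spec_cohort_bucket months_on_art (cohort_bucket months_on_art)

-- ===== LEMMAS AND PROOFS =====

-- B's binary search lands on the first index whose bound is ≥ v (10 past the end), as nested comparisons
set_option maxRecDepth 10000 in
theorem bsearchLo_eval (v : Int) : bsearchLo [3,6,12,24,36,48,60,72,84,96] v 10 0 10 =
    (if v ≤ 48 then (if v ≤ 12 then (if v ≤ 6 then (if v ≤ 3 then 0 else 1) else 2)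
       else (if v ≤ 24 then 3 else if v ≤ 36 then 4 else 5))
     else (if v ≤ 84 then (if v ≤ 72 then (if v ≤ 60 then 6 else 7) else 8)
       else (if v ≤ 96 then 9 else 10)) : Nat) := by
  simp only [bsearchLo, Nat.reduceAdd, Nat.reduceDiv, Nat.reduceLT, reduceIte,
    List.getD_cons_zero, List.getD_cons_succ]
  split_ifs <;> first | rfl | omega

-- A's scan over the enumerated bounds, as nested comparisons
set_option maxRecDepth 10000 in
theorem cohortLoop_eval (v : Int) (L : List String) :
    cohortLoop [(0,3),(1,6),(2,12),(3,24),(4,36),(5,48),(6,60),(7,72),(8,84),(9,96)] v L =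
    (if v ≤ 3 then PySem.List.pyGet? L 0 else if v ≤ 6 then PySem.List.pyGet? L 1
     else if v ≤ 12 then PySem.List.pyGet? L 2 else if v ≤ 24 then PySem.List.pyGet? L 3
     else if v ≤ 36 then PySem.List.pyGet? L 4 else if v ≤ 48 then PySem.List.pyGet? L 5
     else if v ≤ 60 then PySem.List.pyGet? L 6 else if v ≤ 72 then PySem.List.pyGet? L 7
     else if v ≤ 84 then PySem.List.pyGet? L 8 else if v ≤ 96 then PySem.List.pyGet? L 9
     else PySem.List.pyGet? L (-1)) := by
  norm_num [cohortLoop]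

-- ===== VERDICT (by name: the statement is the Claim_ definition above) =====
set_option maxRecDepth 10000 in
theorem cohort_bucket_spec : Claim_equal_cohort_bucket := by
  intro x _
  unfold Spec_cohort_bucket
  cases x with
  | none => rfl
  | some v =>
    show cohortLoop (List.zip (List.range 10) [3,6,12,24,36,48,60,72,84,96]) v
        ["0-3","4-6","7-12","13-24","25-36","37-48","49-60","61-72","73-84","85-96","97+"]
      = PySem.List.pyGet? ["0-3","4-6","7-12","13-24","25-36","37-48","49-60","61-72","73-84","85-96","97+"]
        (bsearchLo [3,6,12,24,36,48,60,72,84,96] v 10 0 10 : Int)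
    rw [show List.zip (List.range 10) ([3,6,12,24,36,48,60,72,84,96] : List Int)
        = [(0,3),(1,6),(2,12),(3,24),(4,36),(5,48),(6,60),(7,72),(8,84),(9,96)] by decide]
    rw [cohortLoop_eval, bsearchLo_eval]
    split_ifs <;> first | rfl | omega
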